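-- pv_equiv track=rewrite | github.com/skeldoy/genchess | chess.py | is_valid_pawn_move
-- ===== SOURCE A (Python) =====
-- def is_valid_pawn_move(board, start, end):
--     piece = board[start[0]][start[1]]
--     start_row, start_col = start
--     end_row, end_col = end
--
--     if piece.isupper():  # White pawn
--         direction = -1
--         initial_row = 6
--     else:  # Black pawn
--         direction = 1
--         initial_row = 1
--
--     row_diff = end_row - start_row
--     col_diff = abs(end_col - start_col)
--
--     if col_diff == 0:
--         if row_diff == direction and board[end_row][end_col] == ' ':
--             return True
--         elif row_diff == 2 * direction and start_row == initial_row and all(board[start_row + i * direction][start_col] == ' '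
-- for i in range(1, 3)):
--             return True
--
--     if col_diff == 1 and row_diff == direction:
--         target_piece = board[end_row][end_col]
--         if (piece.isupper() and target_piece.islower()) or (piece.islower() and target_piece.isupper()):
--             return True
--
--     return False
-- ===== SOURCE B (Python) =====
-- def _cell(board, r, c):
--     # Python-style indexing (negative = from the end), None when out of range.
--     if -len(board) <= r < len(board):
--         row = board[r]
--         if -len(row) <= c < len(row):
--             return row[c]
--     return None
--
--
-- def _is_enemy(piece, target):
--     return (piece.isupper() and target.islower()) or (piece.islower() and target.isupper())
--
--
-- def is_valid_pawn_move(board, start, end):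
--     piece = board[start[0]][start[1]]
--     r, c = start
--     if piece.isupper():
--         d, initial = -1, 6
--     else:
--         d, initial = 1, 1
--     dests = set()
--     if _cell(board, r + d, c) == ' ':
--         dests.add((r + d, c))
--         if r == initial and _cell(board, r + 2 * d, c) == ' ':
--             dests.add((r + 2 * d, c))
--     for dc in (-1, 1):
--         t = _cell(board, r + d, c + dc)
--         if t is not None and _is_enemy(piece, t):
--             dests.add((r + d, c + dc))
--     return (end[0], end[1]) in dests
-- ===== Notes on version B (the rewrite author's own statement) =====
-- stated objective: alternative
-- what changed: B generates the set of legal destination squares (forward one/two steps, diagonal captures) with a bounds-safe cell getter and tests membership of end, instead of A's chain of difference-based branch tests with raw indexing.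
import Mathlib
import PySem

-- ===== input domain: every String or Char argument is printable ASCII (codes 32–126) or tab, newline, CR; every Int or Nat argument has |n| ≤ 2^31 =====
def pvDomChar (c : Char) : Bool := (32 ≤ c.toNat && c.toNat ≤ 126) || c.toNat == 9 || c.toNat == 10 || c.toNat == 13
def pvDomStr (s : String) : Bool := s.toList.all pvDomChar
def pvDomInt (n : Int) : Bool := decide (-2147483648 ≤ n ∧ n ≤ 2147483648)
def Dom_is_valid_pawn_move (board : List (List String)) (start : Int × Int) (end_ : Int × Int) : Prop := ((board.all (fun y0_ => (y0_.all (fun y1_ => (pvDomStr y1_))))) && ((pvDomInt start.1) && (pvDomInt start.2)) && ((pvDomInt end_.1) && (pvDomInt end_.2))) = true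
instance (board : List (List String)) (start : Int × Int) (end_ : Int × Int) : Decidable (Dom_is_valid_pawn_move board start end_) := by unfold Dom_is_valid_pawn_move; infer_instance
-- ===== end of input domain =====

-- B builds the set of legal destination squares and tests membership of end, instead of A's chain of difference-based branch tests; same cost, different decomposition.
-- Python str.isupper()/str.islower() (exact on the ASCII domain: at least one letter and no letter of the opposite case):
def pvIsupper (s : String) : Bool := s.toList.any Char.isAlpha && s.toList.all (fun ch => !ch.isLower)
def pvIslower (s : String) : Bool := s.toList.any Char.isAlpha && s.toList.all (fun ch => !ch.isUpper)
-- board[r][c] in Python semantics (negative index counts from the end), none = IndexError: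
def pvCell (board : List (List String)) (r c : Int) : Option String :=
  (PySem.List.pyGet? board r).bind (fun row => PySem.List.pyGet? row c)

-- ===== PORT A =====
def is_valid_pawn_move (board : List (List String)) (start : Int × Int) (end_ : Int × Int) : Bool :=
  let piece := (pvCell board start.1 start.2).getD ""
  let start_row := start.1
  let start_col := start.2
  let end_row := end_.1
  let end_col := end_.2
  let direction : Int := if pvIsupper piece then -1 else 1
  let initial_row : Int := if pvIsupper piece then 6 else 1
  let row_diff := end_row - start_row
  let col_diff := |end_col - start_col|
  if col_diff == 0 && (row_diff == direction) && ((pvCell board end_row end_col).getD "" == " ") then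
    true
  else if col_diff == 0 && (row_diff == 2 * direction) && (start_row == initial_row) &&
      (PySem.List.pyRange 1 3 1).all
        (fun i => (pvCell board (start_row + i * direction) start_col).getD "" == " ") then
    true
  else if col_diff == 1 && (row_diff == direction) &&
      ((pvIsupper piece && pvIslower ((pvCell board end_row end_col).getD "")) ||
       (pvIslower piece && pvIsupper ((pvCell board end_row end_col).getD ""))) then
    true
  else false

-- ===== PORT B =====
def pvIsEnemy (piece target : String) : Bool :=
  (pvIsupper piece && pvIslower target) || (pvIslower piece && pvIsupper target)

def is_valid_pawn_move_alt (board : List (List String)) (start : Int × Int) (end_ : Int × Int) : Bool :=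
  let piece := (pvCell board start.1 start.2).getD ""
  let r := start.1
  let c := start.2
  let d : Int := if pvIsupper piece then -1 else 1
  let initial : Int := if pvIsupper piece then 6 else 1
  let forward : List (Int × Int) :=
    if pvCell board (r + d) c == some " " then
      if r == initial && pvCell board (r + 2 * d) c == some " " then
        [(r + d, c), (r + 2 * d, c)]
      else [(r + d, c)]
    else []
  let captures : List (Int × Int) :=
    [(-1 : Int), 1].filterMap (fun dc =>
      (pvCell board (r + d) (c + dc)).bind (fun t =>
        if pvIsEnemy piece t then some (r + d, c + dc) else none))
  (forward ++ captures).contains (end_.1, end_.2)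

-- ===== PRECONDITION & SPEC =====
-- Pre_ excludes exactly the inputs on which the Python A raises IndexError: an out-of-range
-- start square, or an out-of-range square inspected by the branch A's move geometry selects.
def Pre_is_valid_pawn_move (board : List (List String)) (start : Int × Int) (end_ : Int × Int) : Prop :=
  (pvCell board start.1 start.2).isSome ∧
  ((let piece := (pvCell board start.1 start.2).getD ""
    let d : Int := if pvIsupper piece then -1 else 1
    let init : Int := if pvIsupper piece then 6 else 1
    let rd := end_.1 - start.1
    let cd := |end_.2 - start.2|
    ((cd = 0 ∧ rd = d) → (pvCell board end_.1 end_.2).isSome) ∧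
    ((cd = 0 ∧ rd = 2 * d ∧ start.1 = init) →
      ((pvCell board (start.1 + d) start.2).isSome ∧
       (pvCell board (start.1 + d) start.2 = some " " →
         (pvCell board (start.1 + 2 * d) start.2).isSome))) ∧
    ((cd = 1 ∧ rd = d) → (pvCell board end_.1 end_.2).isSome)))

instance (board : List (List String)) (start : Int × Int) (end_ : Int × Int) : Decidable (Pre_is_valid_pawn_move board start end_) := by unfold Pre_is_valid_pawn_move; infer_instance

def pvWitness_is_valid_pawn_move : List (List String) × (Int × Int) × (Int × Int) :=
  ([["p"], [" "]], (0, 0), (1, 0))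

def Spec_is_valid_pawn_move (board : List (List String)) (start : Int × Int) (end_ : Int × Int) (out : Bool) : Prop := out = is_valid_pawn_move_alt board start end_
instance (board : List (List String)) (start : Int × Int) (end_ : Int × Int) (out : Bool) : Decidable (Spec_is_valid_pawn_move board start end_ out) := by unfold Spec_is_valid_pawn_move; infer_instance

-- ===== CLAIM (what is proved, stated in full; the proofs are below) =====
def Claim_equal_is_valid_pawn_move : Prop := ∀ (board : List (List String)) (start : Int × Int) (end_ : Int × Int), Dom_is_valid_pawn_move board start end_ → Pre_is_valid_pawn_move board start end_ → Spec_is_valid_pawn_move board start end_ (is_valid_pawn_move board start end_)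

-- ===== LEMMAS AND PROOFS =====
set_option maxHeartbeats 1000000

theorem getD_blank (o : Option String) : (o.getD "" = " ") ↔ o = some " " := by
  cases o <;> simp

theorem enemy_getD (piece : String) (o : Option String) :
    ((pvIsupper piece = true ∧ pvIslower (o.getD "") = true) ∨
     (pvIslower piece = true ∧ pvIsupper (o.getD "") = true))
    ↔ ∃ t, o = some t ∧ pvIsEnemy piece t = true := by
  cases o with
  | none =>
      have h1 : pvIslower "" = false := by decide
      have h2 : pvIsupper "" = false := by decide
      simp [h1, h2]
  | some t => simp [pvIsEnemy]

theorem lhs_iff (board : List (List String)) (piece : String) (r c e1 e2 d init : Int) :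
    ((if |e2 - c| == 0 && (e1 - r == d) && ((pvCell board e1 e2).getD "" == " ") then true
      else if |e2 - c| == 0 && (e1 - r == 2 * d) && (r == init) &&
          ([(1 : Int), 2]).all
            (fun i => (pvCell board (r + i * d) c).getD "" == " ") then true
      else if |e2 - c| == 1 && (e1 - r == d) &&
          ((pvIsupper piece && pvIslower ((pvCell board e1 e2).getD "")) ||
           (pvIslower piece && pvIsupper ((pvCell board e1 e2).getD ""))) then true
      else false) = true)
    ↔ ((|e2 - c| = 0 ∧ e1 - r = d ∧ pvCell board e1 e2 = some " ")
     ∨ (|e2 - c| = 0 ∧ e1 - r = 2 * d ∧ r = init ∧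
        pvCell board (r + 1 * d) c = some " " ∧ pvCell board (r + 2 * d) c = some " ")
     ∨ (|e2 - c| = 1 ∧ e1 - r = d ∧ ∃ t, pvCell board e1 e2 = some t ∧ pvIsEnemy piece t = true)) := by
  simp only [Bool.if_true_left, Bool.or_eq_true, Bool.and_eq_true, beq_iff_eq,
    List.all_cons, List.all_nil, Bool.and_true, decide_eq_true_eq, getD_blank, enemy_getD,
    and_assoc, Bool.false_eq_true, or_false]

theorem cap_mem (board : List (List String)) (piece : String) (r c e1 e2 d : Int) :
    ((e1, e2) ∈ [(-1 : Int), 1].filterMap (fun dc =>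
        (pvCell board (r + d) (c + dc)).bind (fun t =>
          if pvIsEnemy piece t then some (r + d, c + dc) else none)))
    ↔ ((∃ t, pvCell board (r + d) (c + -1) = some t ∧ pvIsEnemy piece t = true ∧ e1 = r + d ∧ e2 = c + -1)
     ∨ (∃ t, pvCell board (r + d) (c + 1) = some t ∧ pvIsEnemy piece t = true ∧ e1 = r + d ∧ e2 = c + 1)) := by
  simp only [List.filterMap_cons, List.filterMap_nil]
  rcases hm : pvCell board (r + d) (c + -1) with _ | tm <;>
    rcases hp : pvCell board (r + d) (c + 1) with _ | tp <;>
    simp only [Option.bind] <;>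
    (try split_ifs with h1) <;>
    simp [Prod.mk.injEq] <;> tauto

theorem fwd_mem (board : List (List String)) (r c e1 e2 d init : Int) :
    ((e1, e2) ∈ (if pvCell board (r + d) c == some " " then
         if r == init && pvCell board (r + 2 * d) c == some " " then
           [(r + d, c), (r + 2 * d, c)]
         else [(r + d, c)]
       else ([] : List (Int × Int))))
    ↔ ((pvCell board (r + d) c = some " " ∧ e1 = r + d ∧ e2 = c)
     ∨ (pvCell board (r + d) c = some " " ∧ r = init ∧ pvCell board (r + 2 * d) c = some " "
        ∧ e1 = r + 2 * d ∧ e2 = c)) := by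
  simp only [beq_iff_eq, Bool.and_eq_true]
  by_cases h2 : r = init
  · subst h2
    by_cases h1 : pvCell board (r + d) c = some " " <;>
      by_cases h3 : pvCell board (r + 2 * d) c = some " " <;>
      simp [h1, h3, Prod.mk.injEq]
  · by_cases h1 : pvCell board (r + d) c = some " " <;>
      simp [h1, h2, Prod.mk.injEq]

theorem rhs_iff (board : List (List String)) (piece : String) (r c e1 e2 d init : Int) :
    (((if pvCell board (r + d) c == some " " then
         if r == init && pvCell board (r + 2 * d) c == some " " then
           [(r + d, c), (r + 2 * d, c)]
         else [(r + d, c)]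
       else []) ++
      ([(-1 : Int), 1].filterMap (fun dc =>
         (pvCell board (r + d) (c + dc)).bind (fun t =>
           if pvIsEnemy piece t then some (r + d, c + dc) else none)))).contains (e1, e2) = true)
    ↔ ((pvCell board (r + d) c = some " " ∧ e1 = r + d ∧ e2 = c)
     ∨ (pvCell board (r + d) c = some " " ∧ r = init ∧ pvCell board (r + 2 * d) c = some " "
        ∧ e1 = r + 2 * d ∧ e2 = c)
     ∨ (∃ t, pvCell board (r + d) (c + -1) = some t ∧ pvIsEnemy piece t = true ∧ e1 = r + d ∧ e2 = c + -1)
     ∨ (∃ t, pvCell board (r + d) (c + 1) = some t ∧ pvIsEnemy piece t = true ∧ e1 = r + d ∧ e2 = c + 1)) := by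
  rw [List.contains_iff_mem, List.mem_append, fwd_mem, cap_mem]
  exact or_assoc

theorem habs0 (x y : Int) : |x - y| = 0 ↔ x = y := by
  rw [abs_eq_zero, sub_eq_zero]

theorem habs1 (x y : Int) : |x - y| = 1 ↔ (x = y + -1 ∨ x = y + 1) := by
  rw [abs_eq (by norm_num : (0:Int) ≤ 1)]; omega

theorem core (board : List (List String)) (piece : String) (r c e1 e2 d init : Int) :
    (if |e2 - c| == 0 && (e1 - r == d) && ((pvCell board e1 e2).getD "" == " ") then true
     else if |e2 - c| == 0 && (e1 - r == 2 * d) && (r == init) &&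
         ([(1 : Int), 2]).all
           (fun i => (pvCell board (r + i * d) c).getD "" == " ") then true
     else if |e2 - c| == 1 && (e1 - r == d) &&
         ((pvIsupper piece && pvIslower ((pvCell board e1 e2).getD "")) ||
          (pvIslower piece && pvIsupper ((pvCell board e1 e2).getD ""))) then true
     else false)
    =
    ((if pvCell board (r + d) c == some " " then
        if r == init && pvCell board (r + 2 * d) c == some " " then
          [(r + d, c), (r + 2 * d, c)]
        else [(r + d, c)]
      else []) ++
     ([(-1 : Int), 1].filterMap (fun dc =>
        (pvCell board (r + d) (c + dc)).bind (fun t =>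
          if pvIsEnemy piece t then some (r + d, c + dc) else none)))).contains (e1, e2) := by
  rw [Bool.eq_iff_iff, lhs_iff, rhs_iff]
  constructor
  · rintro (⟨ha, hb, hc⟩ | ⟨ha, hb, hbi, hc1, hc2⟩ | ⟨ha, hb, t, ht, hen⟩)
    · have h2 : e2 = c := (habs0 e2 c).mp ha
      have h1 : e1 = r + d := by omega
      subst h1; subst h2
      exact Or.inl ⟨hc, rfl, rfl⟩
    · have h2 : e2 = c := (habs0 e2 c).mp ha
      have h1 : e1 = r + 2 * d := by omega
      subst h1; subst h2
      rw [one_mul] at hc1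
      exact Or.inr (Or.inl ⟨hc1, hbi, hc2, rfl, rfl⟩)
    · have h1 : e1 = r + d := by omega
      rcases (habs1 e2 c).mp ha with h2 | h2 <;> subst h1 <;> subst h2
      · exact Or.inr (Or.inr (Or.inl ⟨t, ht, hen, rfl, rfl⟩))
      · exact Or.inr (Or.inr (Or.inr ⟨t, ht, hen, rfl, rfl⟩))
  · rintro (⟨hc, h1, h2⟩ | ⟨hc1, hbi, hc2, h1, h2⟩ | ⟨t, ht, hen, h1, h2⟩ | ⟨t, ht, hen, h1, h2⟩)
    · exact Or.inl ⟨(habs0 e2 c).mpr h2, by omega, by rw [h1, h2]; exact hc⟩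
    · refine Or.inr (Or.inl ⟨(habs0 e2 c).mpr h2, by omega, hbi, ?_, hc2⟩)
      rw [one_mul]; exact hc1
    · exact Or.inr (Or.inr ⟨(habs1 e2 c).mpr (Or.inl h2), by omega, t, by rw [h1, h2]; exact ht, hen⟩)
    · exact Or.inr (Or.inr ⟨(habs1 e2 c).mpr (Or.inr h2), by omega, t, by rw [h1, h2]; exact ht, hen⟩)

theorem pv_main (board : List (List String)) (start : Int × Int) (end_ : Int × Int) :
    is_valid_pawn_move board start end_ = is_valid_pawn_move_alt board start end_ := by
  obtain ⟨r, c⟩ := start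
  obtain ⟨e1, e2⟩ := end_
  show (if _ then _ else _) = _
  rw [show PySem.List.pyRange 1 3 1 = [1, 2] from by decide]
  exact core board ((pvCell board r c).getD "") r c e1 e2 _ _

-- ===== VERDICT (by name: the statement is the Claim_ definition above) =====
theorem is_valid_pawn_move_spec : Claim_equal_is_valid_pawn_move := by
  intro board start end_ _ _
  unfold Spec_is_valid_pawn_move
  exact pv_main board start end_
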